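-- pv_equiv track=rewrite | github.com/BARALLL/MKWLayout | mkwdashboard/tools/plotly_obj_creation.py | df_columns_from_dropdown_labels
-- ===== SOURCE A (Python) =====
-- def df_columns_from_dropdown_labels(data_infos, col_names):
--     mutli_data_augmented = []
--     for info in data_infos:
--         is_axial = False
--         for axis in "XYZW":
--             if f"{info} {axis}" in col_names:
--                 mutli_data_augmented.append(f"{info} {axis}")
--                 is_axial = True
--         if not is_axial:
--             mutli_data_augmented.append(info)
--     return mutli_data_augmented
-- ===== SOURCE B (Python) =====
-- def df_columns_from_dropdown_labels(data_infos, col_names):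
--     # Pass 1: fold col_names into a dict base -> 4-bit axis mask (X=1, Y=2, Z=4, W=8),
--     # splitting each name at its LAST space.
--     BIT = {"X": 1, "Y": 2, "Z": 4, "W": 8}
--     masks = {}
--     for name in col_names:
--         base, sep, suffix = name.rpartition(" ")
--         if sep and suffix in BIT:
--             masks[base] = masks.get(base, 0) | BIT[suffix]
--     # Precomputed decode table: mask -> axis letters in fixed X,Y,Z,W order.
--     EMIT = [[a for b, a in ((1, "X"), (2, "Y"), (4, "Z"), (8, "W")) if m & b]
--             for m in range(16)]
--     # Pass 2: each label is answered by one dict lookup and one table access.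
--     out = []
--     for info in data_infos:
--         m = masks.get(info, 0)
--         if m:
--             out += [f"{info} {a}" for a in EMIT[m]]
--         else:
--             out.append(info)
--     return out
-- ===== Notes on version B (the rewrite author's own statement) =====
-- stated objective: faster
-- what changed: B replaces A's four membership scans of col_names per label by one pass that rsplits every column name on its last space into a dict base -> 4-bit axis mask, plus a precomputed 16-entry mask->axes decode table, so each label is answered by one dict lookup and one table access.
import Mathlib
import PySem

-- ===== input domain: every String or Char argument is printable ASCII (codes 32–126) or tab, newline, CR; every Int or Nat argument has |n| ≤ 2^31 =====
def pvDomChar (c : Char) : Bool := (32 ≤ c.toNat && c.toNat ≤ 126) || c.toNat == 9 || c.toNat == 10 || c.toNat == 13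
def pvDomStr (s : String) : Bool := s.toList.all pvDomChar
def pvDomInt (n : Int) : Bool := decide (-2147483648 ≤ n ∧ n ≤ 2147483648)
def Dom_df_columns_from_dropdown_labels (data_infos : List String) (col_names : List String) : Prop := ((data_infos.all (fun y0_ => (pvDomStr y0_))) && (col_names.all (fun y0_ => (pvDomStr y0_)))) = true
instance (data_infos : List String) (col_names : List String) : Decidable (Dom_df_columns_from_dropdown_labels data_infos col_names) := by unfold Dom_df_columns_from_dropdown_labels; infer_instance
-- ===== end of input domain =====

-- B replaces A's per-(info,axis) membership scans of col_names by one pass that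
-- splits each name at its last space into a dict base -> 4-bit axis mask plus a
-- 16-entry mask -> axes decode table (objective: faster).


-- the string "XYZW" as its character list
def pvXYZW : List Char := ['X', 'Y', 'Z', 'W']

-- f"{info} {axis}" (string formatting as character-list concatenation, exact)
def pvProbe (info : String) (axis : Char) : String := String.ofList (info.toList ++ [' ', axis])

-- ===== PORT A =====
def df_columns_from_dropdown_labels (data_infos : List String) (col_names : List String) : List String :=
  -- outer loop over data_infos; inner loop over "XYZW" threads (mutli_data_augmented, is_axial)
  data_infos.foldl (fun acc info =>
    let r := pvXYZW.foldl (fun (p : List String × Bool) axis =>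
      if pvProbe info axis ∈ col_names then (p.1 ++ [pvProbe info axis], true) else p)
      (acc, false)
    if r.2 then r.1 else r.1 ++ [info]) []

-- ===== PORT B =====
-- the BIT dict {"X":1,"Y":2,"Z":4,"W":8} as lookup on the suffix char list
def pvBitOf (suffix : List Char) : Option Nat :=
  match suffix with
  | ['X'] => some 1 | ['Y'] => some 2 | ['Z'] => some 4 | ['W'] => some 8
  | _ => none

-- name.rpartition(" "): (before-last-space, separator-found?, after-last-space); exact for the one-char separator " "
def pvNotSpace (c : Char) : Bool := c ≠ ' '
def pvRPartSpace (name : String) : List Char × Bool × List Char :=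
  match name.toList.reverse.dropWhile pvNotSpace with
  | [] => ([], false, name.toList)
  | _ :: t => (t.reverse, true, (name.toList.reverse.takeWhile pvNotSpace).reverse)

-- masks[base] = masks.get(base, 0) | BIT[suffix]
def pvMaskStep (d : PySem.Dict String Nat) (name : String) : PySem.Dict String Nat :=
  match pvRPartSpace name with
  | (base, true, suffix) =>
    match pvBitOf suffix with
    | some b => d.insert (String.ofList base) ((d.getD (String.ofList base) 0) ||| b)
    | none => d
  | _ => d

-- the ((1,"X"),(2,"Y"),(4,"Z"),(8,"W")) tuple
def pvBITS : List (Nat × Char) := [(1, 'X'), (2, 'Y'), (4, 'Z'), (8, 'W')]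

-- EMIT = [[a for b, a in BITS if m & b] for m in range(16)]
def pvEmit (m : Nat) : List Char := (pvBITS.filter (fun p => m &&& p.1 != 0)).map Prod.snd
def pvEMIT : List (List Char) := (List.range 16).map pvEmit

def df_columns_from_dropdown_labels_alt (data_infos : List String) (col_names : List String) : List String :=
  let masks := col_names.foldl pvMaskStep PySem.Dict.empty
  data_infos.foldl (fun out info =>
    let m := masks.getD info 0
    if m ≠ 0 then
      -- EMIT[m]: always in range since every stored mask is an OR of bits 1,2,4,8, hence < 16
      out ++ (pvEMIT.getD m []).map (pvProbe info)
    else out ++ [info]) []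

-- ===== PRECONDITION & SPEC =====
def Spec_df_columns_from_dropdown_labels (data_infos : List String) (col_names : List String) (out : List String) : Prop := out = df_columns_from_dropdown_labels_alt data_infos col_names
instance (data_infos : List String) (col_names : List String) (out : List String) : Decidable (Spec_df_columns_from_dropdown_labels data_infos col_names out) := by unfold Spec_df_columns_from_dropdown_labels; infer_instance

-- ===== CLAIM (what is proved, stated in full; the proofs are below) =====
def Claim_equal_df_columns_from_dropdown_labels : Prop := ∀ (data_infos : List String) (col_names : List String), Dom_df_columns_from_dropdown_labels data_infos col_names → Spec_df_columns_from_dropdown_labels data_infos col_names (df_columns_from_dropdown_labels data_infos col_names)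

-- ===== LEMMAS AND PROOFS =====

-- the mask value determined by the four memberships
def pvMask4 (x y z w : Bool) : Nat := (cond x 1 0) ||| (cond y 2 0) ||| (cond z 4 0) ||| (cond w 8 0)

-- the axes list determined by the four memberships
def pvSel (x y z w : Bool) : List Char :=
  (cond x ['X'] []) ++ (cond y ['Y'] []) ++ (cond z ['Z'] []) ++ (cond w ['W'] [])

def pvMemB (col : List String) (info : String) (a : Char) : Bool := decide (pvProbe info a ∈ col)

theorem pv_dropWhile_head {p : Char → Bool} : ∀ (l : List Char) (x : Char) (xs : List Char),
    List.dropWhile p l = x :: xs → p x = false := by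
  intro l
  induction l with
  | nil => intro x xs h; simp at h
  | cons a t ih =>
    intro x xs h
    by_cases hp : p a
    · rw [List.dropWhile_cons_of_pos hp] at h; exact ih x xs h
    · rw [List.dropWhile_cons_of_neg (by simpa using hp)] at h
      cases h; simpa using hp

-- (a) a name of the probe shape is rpartitioned exactly
theorem pvRPart_probe (base : List Char) (a : Char) (ha : a ≠ ' ') :
    pvRPartSpace (String.ofList (base ++ [' ', a])) = (base, true, [a]) := by
  unfold pvRPartSpace
  have hrev : (String.ofList (base ++ [' ', a])).toList.reverse = a :: ' ' :: base.reverse := by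
    simp
  rw [hrev]
  have h1 : List.dropWhile pvNotSpace (a :: ' ' :: base.reverse) = ' ' :: base.reverse := by
    rw [List.dropWhile_cons_of_pos (by simp [pvNotSpace, ha]),
        List.dropWhile_cons_of_neg (by simp [pvNotSpace])]
  have h2 : List.takeWhile pvNotSpace (a :: ' ' :: base.reverse) = [a] := by
    rw [List.takeWhile_cons_of_pos (by simp [pvNotSpace, ha]),
        List.takeWhile_cons_of_neg (by simp [pvNotSpace])]
  rw [h1, h2]
  simp

-- (b) if the guard fires, the name is literally base ++ " " ++ axis
theorem pvRPart_shape (name : String) (base suffix : List Char)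
    (h : pvRPartSpace name = (base, true, suffix)) (a : Char) (hs : suffix = [a]) :
    name.toList = base ++ [' ', a] := by
  unfold pvRPartSpace at h
  rcases hd : List.dropWhile pvNotSpace name.toList.reverse with _ | ⟨r, t⟩
  · rw [hd] at h; simp at h
  · rw [hd] at h
    simp only [Prod.mk.injEq] at h
    obtain ⟨hb, _, hsuf⟩ := h
    have hr : r = ' ' := by
      have := pv_dropWhile_head name.toList.reverse r t hd
      simpa [pvNotSpace] using this
    have htw : List.takeWhile pvNotSpace name.toList.reverse = [a] := by
      have : (List.takeWhile pvNotSpace name.toList.reverse).reverse = [a] := by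
        rw [hsuf, hs]
      simpa using congrArg List.reverse this
    have hsplit : name.toList.reverse = [a] ++ ' ' :: t := by
      conv_lhs => rw [← List.takeWhile_append_dropWhile (p := pvNotSpace)
        (l := name.toList.reverse)]
      rw [htw, hd, hr]
    have := congrArg List.reverse hsplit
    simpa [← hb] using this

-- a some-result of the BIT lookup pins the suffix to a single non-space char
theorem pvBitOf_shape (s : List Char) (b : Nat) (h : pvBitOf s = some b) :
    ∃ a, s = [a] ∧ a ≠ ' ' ∧ pvBitOf [a] = some b := by
  unfold pvBitOf at h
  split at h
  · cases h; exact ⟨'X', rfl, by decide, rfl⟩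
  · cases h; exact ⟨'Y', rfl, by decide, rfl⟩
  · cases h; exact ⟨'Z', rfl, by decide, rfl⟩
  · cases h; exact ⟨'W', rfl, by decide, rfl⟩
  · simp at h

-- probe strings are injective in the axis
theorem pvProbe_inj_axis (info : String) (a a' : Char) :
    pvProbe info a = pvProbe info a' ↔ a = a' := by
  constructor
  · intro h
    have := congrArg String.toList h
    simp [pvProbe] at this
    exact this
  · rintro rfl; rfl

-- the step at a probe name ORs the axis bit into the entry at info
theorem pvMaskStep_probe (d : PySem.Dict String Nat) (info : String) (a : Char) (b : Nat)
    (ha : a ≠ ' ') (hb : pvBitOf [a] = some b) :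
    (pvMaskStep d (pvProbe info a)).getD info 0 = d.getD info 0 ||| b := by
  unfold pvMaskStep
  have hp : pvProbe info a = String.ofList (info.toList ++ [' ', a]) := rfl
  rw [hp, pvRPart_probe info.toList a ha]
  simp [hb, PySem.Dict.getD_insert_self, String.ofList_toList]

-- the step at any other name leaves the entry at info unchanged
theorem pvMaskStep_frame (d : PySem.Dict String Nat) (n info : String)
    (h : ∀ a b, pvBitOf [a] = some b → n ≠ pvProbe info a) :
    (pvMaskStep d n).getD info 0 = d.getD info 0 := by
  unfold pvMaskStep
  rcases hr : pvRPartSpace n with ⟨base, sep, suffix⟩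
  cases sep
  · rfl
  · rcases hb : pvBitOf suffix with _ | b
    · simp only [hb]
    · obtain ⟨a, hs, ha, hba⟩ := pvBitOf_shape suffix b hb
      have hkey : String.ofList base ≠ info := by
        intro hk
        have hbase : base = info.toList := by
          have := congrArg String.toList hk
          simpa using this
        have hn : n = pvProbe info a := by
          have hl := pvRPart_shape n base suffix hr a hs
          have : n.toList = (pvProbe info a).toList := by simp [pvProbe, hl, hbase]
          have := congrArg String.ofList this
          simpa [String.ofList_toList] using this
        exact h a b hba hn
      simp only [hb]
      rw [PySem.Dict.getD_insert_of_ne d _ 0 (Ne.symm hkey)]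

-- OR-absorption of each bit into pvMask4 (finite, by decide)
theorem pvMask4_orX : ∀ x y z w : Bool, 1 ||| pvMask4 x y z w = pvMask4 true y z w := by decide
theorem pvMask4_orY : ∀ x y z w : Bool, 2 ||| pvMask4 x y z w = pvMask4 x true z w := by decide
theorem pvMask4_orZ : ∀ x y z w : Bool, 4 ||| pvMask4 x y z w = pvMask4 x y true w := by decide
theorem pvMask4_orW : ∀ x y z w : Bool, 8 ||| pvMask4 x y z w = pvMask4 x y z true := by decide

theorem pvMemB_cons (n : String) (rest : List String) (info : String) (a : Char) :
    pvMemB (n :: rest) info a = (decide (pvProbe info a = n) || pvMemB rest info a) := by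
  simp [pvMemB, List.mem_cons]

-- the folded dict's entry at info is exactly the membership mask of col_names
theorem mask_fold (info : String) : ∀ (names : List String) (d : PySem.Dict String Nat),
    (names.foldl pvMaskStep d).getD info 0
      = d.getD info 0 |||
        pvMask4 (pvMemB names info 'X') (pvMemB names info 'Y')
                (pvMemB names info 'Z') (pvMemB names info 'W') := by
  intro names
  induction names with
  | nil => intro d; simp [pvMemB, pvMask4]
  | cons n rest ih =>
    intro d
    simp only [List.foldl_cons]
    rw [ih]
    by_cases hX : n = pvProbe info 'X'
    · subst hX
      rw [pvMaskStep_probe d info 'X' 1 (by decide) rfl, Nat.or_assoc, pvMask4_orX]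
      simp [pvMemB_cons, pvProbe_inj_axis]
    · by_cases hY : n = pvProbe info 'Y'
      · subst hY
        rw [pvMaskStep_probe d info 'Y' 2 (by decide) rfl, Nat.or_assoc, pvMask4_orY]
        simp [pvMemB_cons, pvProbe_inj_axis]
      · by_cases hZ : n = pvProbe info 'Z'
        · subst hZ
          rw [pvMaskStep_probe d info 'Z' 4 (by decide) rfl, Nat.or_assoc, pvMask4_orZ]
          simp [pvMemB_cons, pvProbe_inj_axis]
        · by_cases hW : n = pvProbe info 'W'
          · subst hW
            rw [pvMaskStep_probe d info 'W' 8 (by decide) rfl, Nat.or_assoc, pvMask4_orW]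
            simp [pvMemB_cons, pvProbe_inj_axis]
          · have hfr : ∀ a b, pvBitOf [a] = some b → n ≠ pvProbe info a := by
              intro a b hb
              unfold pvBitOf at hb
              split at hb <;> simp_all
            rw [pvMaskStep_frame d n info hfr]
            have eX : pvMemB (n :: rest) info 'X' = pvMemB rest info 'X' := by
              rw [pvMemB_cons]; simp [Ne.symm hX]
            have eY : pvMemB (n :: rest) info 'Y' = pvMemB rest info 'Y' := by
              rw [pvMemB_cons]; simp [Ne.symm hY]
            have eZ : pvMemB (n :: rest) info 'Z' = pvMemB rest info 'Z' := by
              rw [pvMemB_cons]; simp [Ne.symm hZ]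
            have eW : pvMemB (n :: rest) info 'W' = pvMemB rest info 'W' := by
              rw [pvMemB_cons]; simp [Ne.symm hW]
            rw [eX, eY, eZ, eW]

-- the decode table agrees with pvSel (finite, by decide)
theorem pvEMIT_sel : ∀ x y z w : Bool, pvEMIT.getD (pvMask4 x y z w) [] = pvSel x y z w := by
  decide

theorem pvMask4_ne_zero : ∀ x y z w : Bool,
    decide (pvMask4 x y z w ≠ 0) = (x || (y || (z || w))) := by decide

theorem pvFilter_sel (f : Char → Bool) :
    pvXYZW.filter f = pvSel (f 'X') (f 'Y') (f 'Z') (f 'W') := by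
  rcases hX : f 'X' <;> rcases hY : f 'Y' <;> rcases hZ : f 'Z' <;> rcases hW : f 'W' <;>
    simp [pvXYZW, pvSel, hX, hY, hZ, hW]

theorem pvAny_or (f : Char → Bool) :
    pvXYZW.any f = (f 'X' || (f 'Y' || (f 'Z' || f 'W'))) := by
  simp [pvXYZW]

-- A's inner loop over the axes equals acc ++ the filtered-mapped matches, with the is_axial flag
theorem inner_loop (col_names : List String) (info : String) :
    ∀ (axs : List Char) (acc : List String) (b : Bool),
      axs.foldl (fun (p : List String × Bool) axis =>
        if pvProbe info axis ∈ col_names then (p.1 ++ [pvProbe info axis], true) else p) (acc, b)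
      = (acc ++ (axs.filter (fun axis => pvProbe info axis ∈ col_names)).map (pvProbe info),
         b || axs.any (fun axis => pvProbe info axis ∈ col_names)) := by
  intro axs
  induction axs with
  | nil => intro acc b; simp
  | cons a rest ih =>
    intro acc b
    simp only [List.foldl_cons, List.filter_cons, List.any_cons]
    by_cases h : pvProbe info a ∈ col_names
    · simp [h, ih]
    · simp [h, ih]

-- ===== VERDICT (by name: the statement is the Claim_ definition above) =====
theorem df_columns_from_dropdown_labels_spec : Claim_equal_df_columns_from_dropdown_labels := by
  intro data_infos col_names _
  unfold Spec_df_columns_from_dropdown_labels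
  unfold df_columns_from_dropdown_labels df_columns_from_dropdown_labels_alt
  refine congrFun (congrFun (congrArg _ ?_) []) data_infos
  funext acc info
  rw [inner_loop]
  simp only [mask_fold, PySem.Dict.getD_empty, Nat.zero_or, pvMemB, Bool.false_or]
  rw [pvFilter_sel (fun a => decide (pvProbe info a ∈ col_names)),
      pvAny_or (fun a => decide (pvProbe info a ∈ col_names))]
  by_cases hcond : (decide (pvProbe info 'X' ∈ col_names) ||
      (decide (pvProbe info 'Y' ∈ col_names) || (decide (pvProbe info 'Z' ∈ col_names) ||
        decide (pvProbe info 'W' ∈ col_names)))) = true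
  · rw [if_pos hcond, if_pos (of_decide_eq_true (by rw [pvMask4_ne_zero]; exact hcond)),
        pvEMIT_sel]
  · have h4 := hcond
    simp only [Bool.or_eq_true, not_or, Bool.not_eq_true] at h4
    obtain ⟨hX, hY, hZ, hW⟩ := h4
    rw [if_neg hcond, if_neg (by
      have : decide (pvMask4 (decide (pvProbe info 'X' ∈ col_names))
          (decide (pvProbe info 'Y' ∈ col_names)) (decide (pvProbe info 'Z' ∈ col_names))
          (decide (pvProbe info 'W' ∈ col_names)) ≠ 0) = false := by
        rw [pvMask4_ne_zero]; simp [hX, hY, hZ, hW]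
      exact of_decide_eq_false this)]
    simp [hX, hY, hZ, hW, pvSel]
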